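-- pv_equiv track=rewrite | github.com/prion-1/CDS-Optimizer | src/degeneracy.py | binary_runs
-- ===== SOURCE A (Python) =====
-- from typing import Any, Dict, List, Tuple
--
-- def binary_runs(sequence: str, allowed: set[str]) -> List[Tuple[int, int]]:
--     runs: List[Tuple[int, int]] = []
--     start = None
--
--     for idx, base in enumerate(sequence):
--         if base in allowed:
--             if start is None:
--                 start = idx
--         elif start is not None:
--             runs.append((start, idx - start))
--             start = None
--
--     if start is not None:
--         runs.append((start, len(sequence) - start))
--     return runs
-- ===== SOURCE B (Python) =====
-- from typing import Any, Dict, List, Tuple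
--
-- def binary_runs(sequence: str, allowed: set[str]) -> List[Tuple[int, int]]:
--     # Two-pointer scan: when an allowed base is found, span the whole run at once.
--     runs: List[Tuple[int, int]] = []
--     n = len(sequence)
--     i = 0
--     while i < n:
--         if sequence[i] in allowed:
--             j = i + 1
--             while j < n and sequence[j] in allowed:
--                 j += 1
--             runs.append((i, j - i))
--             i = j
--         else:
--             i += 1
--     return runs
-- ===== Notes on version B (the rewrite author's own statement) =====
-- stated objective: alternative
-- what changed: Replaced the per-character start-sentinel state machine with end-of-loop flush by a two-pointer scan that, on meeting an allowed character, spans the entire run at once and emits it immediately (no Optional state, no trailing flush).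
import Mathlib
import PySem

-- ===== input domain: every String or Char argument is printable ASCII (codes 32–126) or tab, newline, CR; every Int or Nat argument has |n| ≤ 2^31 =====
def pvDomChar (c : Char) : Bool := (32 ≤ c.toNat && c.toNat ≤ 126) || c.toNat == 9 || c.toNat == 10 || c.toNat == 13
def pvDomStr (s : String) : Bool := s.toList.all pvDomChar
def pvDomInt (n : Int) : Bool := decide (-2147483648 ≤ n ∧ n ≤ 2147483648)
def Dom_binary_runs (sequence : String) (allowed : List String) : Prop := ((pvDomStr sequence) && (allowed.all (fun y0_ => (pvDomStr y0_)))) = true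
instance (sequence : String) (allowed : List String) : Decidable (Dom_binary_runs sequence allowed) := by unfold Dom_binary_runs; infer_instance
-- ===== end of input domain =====

-- B replaces A's start-sentinel state machine (with its end-of-loop flush) by a
-- two-pointer scan that spans each allowed run at once and emits it immediately.


-- ===== PORT A =====
-- loop body of A's for-loop (state: runs so far, optional run start)
def stepA (m : Char → Bool) (st : List (Int × Int) × Option Int) (p : Int × Char) :
    List (Int × Int) × Option Int :=
  if m p.2 then
    match st.2 with
    | none => (st.1, some p.1)
    | some _ => st
  else
    match st.2 with
    | some s => (st.1 ++ [(s, p.1 - s)], none)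
    | none => st

-- A's trailing 'if start is not None' flush (e = len(sequence))
def flushA (e : Int) (st : List (Int × Int) × Option Int) : List (Int × Int) :=
  match st.2 with
  | some s => st.1 ++ [(s, e - s)]
  | none => st.1

def binary_runs (sequence : String) (allowed : List String) : List (Int × Int) :=
  let m := fun c => allowed.contains (String.ofList [c])
  flushA (PySem.Str.len sequence)
    ((PySem.List.enumerate sequence.toList 0).foldl (stepA m) ([], none))

-- ===== PORT B =====
-- B's outer while-loop; the inner 'while j < n and sequence[j] in allowed' is the
-- takeWhile/dropWhile span of the remaining characters.
def altScan (m : Char → Bool) (i : Int) : List Char → List (Int × Int)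
  | [] => []
  | c :: t =>
    if m c then
      (i, 1 + ((t.takeWhile m).length : Int)) ::
        altScan m (i + 1 + ((t.takeWhile m).length : Int)) (t.dropWhile m)
    else
      altScan m (i + 1) t
  termination_by l => l.length
  decreasing_by
    · have := List.length_dropWhile_le m t; simp; omega
    · simp

def binary_runs_alt (sequence : String) (allowed : List String) : List (Int × Int) :=
  altScan (fun c => allowed.contains (String.ofList [c])) 0 sequence.toList

-- ===== PRECONDITION & SPEC =====
def Spec_binary_runs (sequence : String) (allowed : List String) (out : List (Int × Int)) : Prop := out = binary_runs_alt sequence allowed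
instance (sequence : String) (allowed : List String) (out : List (Int × Int)) : Decidable (Spec_binary_runs sequence allowed out) := by unfold Spec_binary_runs; infer_instance

-- ===== CLAIM (what is proved, stated in full; the proofs are below) =====
def Claim_equal_binary_runs : Prop := ∀ (sequence : String) (allowed : List String), Dom_binary_runs sequence allowed → Spec_binary_runs sequence allowed (binary_runs sequence allowed)

-- ===== LEMMAS AND PROOFS =====

-- Invariant of A's loop: folding from index i with no open run yields B's scan of the
-- rest; with an open run started at s it yields that run (closed where the allowed
-- prefix ends) followed by B's scan of the remainder.
theorem foldA_altScan (m : Char → Bool) (l : List Char) : ∀ (i : Int) (runs : List (Int × Int)),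
    (flushA (i + (l.length : Int))
        ((PySem.List.enumerate l i).foldl (stepA m) (runs, none)) =
      runs ++ altScan m i l)
    ∧ ∀ s : Int,
      flushA (i + (l.length : Int))
          ((PySem.List.enumerate l i).foldl (stepA m) (runs, some s)) =
        runs ++ (s, i + ((l.takeWhile m).length : Int) - s) ::
          altScan m (i + ((l.takeWhile m).length : Int)) (l.dropWhile m) := by
  induction l with
  | nil =>
    intro i runs
    constructor
    · simp [PySem.List.enumerate_nil, flushA, altScan]
    · intro s; simp [PySem.List.enumerate_nil, flushA, altScan]
  | cons c t ih =>
    intro i runs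
    have hlen : (i + ((c :: t).length : Int)) = (i + 1) + (t.length : Int) := by
      push_cast [List.length_cons]; ring
    by_cases hc : m c
    · refine ⟨?_, ?_⟩
      · rw [PySem.List.enumerate_cons, hlen]
        simp only [List.foldl_cons, stepA, hc, reduceIte]
        rw [(ih (i + 1) runs).2 i]
        simp [altScan, hc]
        omega
      · intro s
        rw [PySem.List.enumerate_cons, hlen]
        simp only [List.foldl_cons, stepA, hc, reduceIte]
        rw [(ih (i + 1) runs).2 s]
        have e1 : i + (((c :: t).takeWhile m).length : Int)
            = i + 1 + ((t.takeWhile m).length : Int) := by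
          rw [List.takeWhile_cons_of_pos hc]; push_cast [List.length_cons]; ring
        rw [e1, List.dropWhile_cons_of_pos hc]
    · refine ⟨?_, ?_⟩
      · rw [PySem.List.enumerate_cons, hlen]
        simp only [List.foldl_cons, stepA, hc, Bool.false_eq_true, reduceIte]
        rw [(ih (i + 1) runs).1]
        simp [altScan, hc]
      · intro s
        rw [PySem.List.enumerate_cons, hlen]
        simp only [List.foldl_cons, stepA, hc, Bool.false_eq_true, reduceIte]
        rw [(ih (i + 1) (runs ++ [(s, i - s)])).1]
        rw [List.takeWhile_cons_of_neg hc, List.dropWhile_cons_of_neg hc]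
        simp [altScan, hc]

-- ===== VERDICT (by name: the statement is the Claim_ definition above) =====
theorem binary_runs_spec : Claim_equal_binary_runs := by
  intro sequence allowed _
  unfold Spec_binary_runs binary_runs binary_runs_alt
  have h := (foldA_altScan (fun c => allowed.contains (String.ofList [c])) sequence.toList 0 []).1
  simpa [PySem.Str.len_eq] using h
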